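-- pv_equiv track=rewrite | github.com/jonas-skywalker/hurricane-compiler | src/parser/lexer.py | screw_comments
-- ===== SOURCE A (Python) =====
-- def split_surround(source, c, label):
--     spl = source.split(c)
--     ret = []
--     for s in spl:
--         ret += [(s, None), (c, label)]
--     return ret[:-1]
--
-- def screw_comments(source):
--     parts = split_surround(source, "#multiline-start#", "comment-start")
--     new_sources = []
--     for (split_word, matched_label) in parts:
--         if matched_label:
--             new_sources.append((split_word, matched_label))
--         else:
--             new_sources += split_surround(split_word, "#multiline-end#", "comment-end")
--     parts = new_sources
--     ret = ""
--     in_comment = False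
--     for p in parts:
--         if p[1] == "comment-start":
--             in_comment = True
--             continue
--         elif p[1] == "comment-end":
--             in_comment = False
--             continue
--         elif in_comment:
--             continue
--         else:
--             ret += p[0]
--     return ret
-- ===== SOURCE B (Python) =====
-- START = "#multiline-start#"
-- END = "#multiline-end#"
--
-- def screw_comments(source):
--     out = []
--     i = 0
--     in_comment = False
--     while i < len(source):
--         if source.startswith(START, i):
--             in_comment = True
--             i += len(START)
--         elif source.startswith(END, i):
--             in_comment = False
--             i += len(END)
--         elif in_comment:
--             i += 1
--         else:
--             out.append(source[i])
--             i += 1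
--     return "".join(out)
-- ===== Notes on version B (the rewrite author's own statement) =====
-- stated objective: simpler
-- what changed: Replaced the two-level split/label/relabel pipeline (split on the start marker, re-split each chunk on the end marker into labeled tuples, then a state-machine fold over the tuples) by a single left-to-right scanner with one index and one in_comment flag that drops markers and commented characters as it goes.
-- outside the precondition, e.g. on screw_comments('#multiline-end#multiline-start#'): A returns '#multiline-end', B returns 'multiline-start#'
import Mathlib
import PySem

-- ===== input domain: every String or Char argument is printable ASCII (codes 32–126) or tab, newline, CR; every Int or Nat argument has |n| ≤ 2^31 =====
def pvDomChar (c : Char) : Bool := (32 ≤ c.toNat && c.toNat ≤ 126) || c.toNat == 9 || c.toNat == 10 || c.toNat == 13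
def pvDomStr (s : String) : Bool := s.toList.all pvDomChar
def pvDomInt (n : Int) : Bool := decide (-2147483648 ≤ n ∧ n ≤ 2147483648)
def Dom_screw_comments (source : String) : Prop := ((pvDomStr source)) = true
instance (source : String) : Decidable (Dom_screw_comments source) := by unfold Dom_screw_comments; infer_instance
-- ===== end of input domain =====

-- B replaces A's split/label/relabel pipeline by a single left-to-right scanner with one
-- in_comment flag (objective: simpler; equivalence proved on sources without the
-- overlapping-marker substring "#multiline-end#multiline-start#", see Pre_).

-- ===== PORT A =====
-- the two marker strings, as character lists
def mlStart : List Char := ['#', 'm', 'u', 'l', 't', 'i', 'l', 'i', 'n', 'e', '-', 's', 't', 'a', 'r', 't', '#']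
def mlEnd : List Char := ['#', 'm', 'u', 'l', 't', 'i', 'l', 'i', 'n', 'e', '-', 'e', 'n', 'd', '#']

-- split_surround(source, c, label); c is a nonempty literal at both call sites, so
-- Python's str.split never raises here (PySem.Chars.splitOn is the sep ≠ "" form)
def split_surround (source c : List Char) (label : Option String) :
    List (List Char × Option String) :=
  let spl := PySem.Chars.splitOn source c
  let ret := spl.foldl (fun ret s => ret ++ [(s, (none : Option String)), (c, label)]) []
  PySem.List.slice ret none (some (-1))

-- the body of A's final 'for p in parts' loop, over the state (ret, in_comment)
def stepA (st : List Char × Bool) (p : List Char × Option String) : List Char × Bool :=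
  if p.2 == some "comment-start" then (st.1, true)
  else if p.2 == some "comment-end" then (st.1, false)
  else if st.2 then st
  else (st.1 ++ p.1, st.2)

def screw_comments (source : String) : String :=
  let parts := split_surround source.toList mlStart (some "comment-start")
  let new_sources := parts.foldl (fun ns p =>
      match p.2 with
      | some lbl => ns ++ [(p.1, some lbl)]
      | none => ns ++ split_surround p.1 mlEnd (some "comment-end")) []
  let fin := new_sources.foldl stepA ([], false)
  String.ofList fin.1

-- ===== PORT B =====
-- Source B's while-loop: index i / in_comment scanner, transcribed as recursion on the tail
def scanGo (cs : List Char) (inC : Bool) : List Char :=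
  if h1 : mlStart.isPrefixOf cs then scanGo (cs.drop mlStart.length) true
  else if h2 : mlEnd.isPrefixOf cs then scanGo (cs.drop mlEnd.length) false
  else
    match cs with
    | [] => []
    | c :: rest => if inC then scanGo rest inC else c :: scanGo rest inC
termination_by cs.length
decreasing_by
  · have := List.IsPrefix.length_le (List.isPrefixOf_iff_prefix.mp h1)
    simp only [List.length_drop]
    have h17 : mlStart.length = 17 := by decide
    omega
  · have := List.IsPrefix.length_le (List.isPrefixOf_iff_prefix.mp h2)
    simp only [List.length_drop]
    have h15 : mlEnd.length = 15 := by decide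
    omega
  all_goals simp

def screw_comments_alt (source : String) : String :=
  String.ofList (scanGo source.toList false)

-- ===== PRECONDITION & SPEC =====
def badL : List Char := ['#', 'm', 'u', 'l', 't', 'i', 'l', 'i', 'n', 'e', '-', 'e', 'n', 'd', '#', 'm', 'u', 'l', 't', 'i', 'l', 'i', 'n', 'e', '-', 's', 't', 'a', 'r', 't', '#']

-- Pre_ excludes sources containing the overlapping-marker substring
-- "#multiline-end#multiline-start#" (the two markers sharing one '#'): there A's
-- global split-on-start precedence and B's leftmost scan are both defensible readings
-- of this unspecified corner and return different values.
def Pre_screw_comments (source : String) : Prop := ¬ (badL <:+: source.toList)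
instance (source : String) : Decidable (Pre_screw_comments source) := by
  unfold Pre_screw_comments; infer_instance

def pvWitness_screw_comments : String := "a #multiline-start# b #multiline-end# c"

def Spec_screw_comments (source : String) (out : String) : Prop := out = screw_comments_alt source
instance (source : String) (out : String) : Decidable (Spec_screw_comments source out) := by unfold Spec_screw_comments; infer_instance

-- ===== CLAIM (what is proved, stated in full; the proofs are below) =====
def Claim_equal_screw_comments : Prop := ∀ (source : String), Dom_screw_comments source → Pre_screw_comments source → Spec_screw_comments source (screw_comments source)

-- ===== LEMMAS AND PROOFS =====

-- a recursive reformulation of Python's str.split(sep) for nonempty sep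
def consHead (c : Char) : List (List Char) → List (List Char)
  | [] => [[c]]
  | h :: t => (c :: h) :: t

def mySplit (sep : List Char) : List Char → List (List Char)
  | [] => [[]]
  | c :: r =>
    if h : sep.isPrefixOf (c :: r) = true ∧ sep ≠ [] then
      [] :: mySplit sep ((c :: r).drop sep.length)
    else
      consHead c (mySplit sep r)
termination_by s => s.length
decreasing_by
  · have := List.IsPrefix.length_le (List.isPrefixOf_iff_prefix.mp h.1)
    have : 1 ≤ sep.length := List.length_pos_of_ne_nil h.2
    simp only [List.length_drop]
    omega
  · simp

theorem mySplit_nil (sep : List Char) : mySplit sep [] = [[]] := by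
  rw [mySplit]

theorem mySplit_pos (sep : List Char) (c : Char) (r : List Char)
    (h : sep.isPrefixOf (c :: r) = true) (hs : sep ≠ []) :
    mySplit sep (c :: r) = [] :: mySplit sep ((c :: r).drop sep.length) := by
  rw [mySplit, dif_pos ⟨h, hs⟩]

theorem mySplit_neg (sep : List Char) (c : Char) (r : List Char)
    (h : ¬ sep.isPrefixOf (c :: r) = true) :
    mySplit sep (c :: r) = consHead c (mySplit sep r) := by
  rw [mySplit, dif_neg (by tauto)]

theorem mySplit_ne_nil (sep l : List Char) : mySplit sep l ≠ [] := by
  cases l with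
  | nil => rw [mySplit_nil]; simp
  | cons c r =>
    rw [mySplit]
    split
    · simp
    · cases mySplit sep r <;> simp [consHead]

def headPre (pre : List Char) : List (List Char) → List (List Char)
  | [] => [pre]
  | h :: t => (pre ++ h) :: t

theorem headPre_consHead (pre : List Char) (c : Char) (X : List (List Char)) :
    headPre pre (consHead c X) = headPre (pre ++ [c]) X := by
  cases X <;> simp [headPre, consHead]

theorem headPre_nil_of_ne_nil (X : List (List Char)) (h : X ≠ []) : headPre [] X = X := by
  cases X with
  | nil => exact absurd rfl h
  | cons a t => simp [headPre]

theorem go_eq (sep : List Char) (hsep : sep ≠ []) :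
    ∀ (fuel : Nat) (l cur : List Char) (acc : List (List Char)), l.length < fuel →
      PySem.Chars.splitOn.go sep fuel l cur acc
        = acc.reverse ++ headPre cur.reverse (mySplit sep l) := by
  intro fuel
  induction fuel with
  | zero => intro l cur acc h; omega
  | succ fuel ih =>
    intro l cur acc h
    cases l with
    | nil =>
      rw [mySplit_nil]
      simp [PySem.Chars.splitOn.go, headPre]
    | cons c r =>
      by_cases hp : sep.isPrefixOf (c :: r) = true
      · rw [PySem.Chars.splitOn.go]
        simp only [hp, if_true]
        have hlen : ((c :: r).drop sep.length).length < fuel := by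
          have h1 : 1 ≤ sep.length := List.length_pos_of_ne_nil hsep
          simp only [List.length_drop, List.length_cons] at *
          omega
        rw [ih _ _ _ hlen, mySplit_pos sep c r hp hsep]
        rcases hX : mySplit sep ((c :: r).drop sep.length) with _ | ⟨x, xs⟩
        · exact absurd hX (mySplit_ne_nil sep _)
        · simp [headPre]
      · rw [PySem.Chars.splitOn.go]
        simp only [hp]
        have hlen : r.length < fuel := by simp only [List.length_cons] at h; omega
        rw [ih _ _ _ hlen, mySplit_neg sep c r hp, headPre_consHead]
        simp

theorem splitOn_eq (s sep : List Char) (hsep : sep ≠ []) :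
    PySem.Chars.splitOn s sep = mySplit sep s := by
  unfold PySem.Chars.splitOn
  rw [go_eq sep hsep _ _ _ _ (by omega)]
  simp [headPre_nil_of_ne_nil _ (mySplit_ne_nil sep s)]

-- the labeled interleaving split_surround produces
def inter (sep : List Char) (label : Option String) :
    List (List Char) → List (List Char × Option String)
  | [] => []
  | [x] => [(x, (none : Option String))]
  | x :: y :: t => (x, (none : Option String)) :: (sep, label) :: inter sep label (y :: t)

theorem dropLast_flatMap_pair (sep : List Char) (label : Option String) (xs : List (List Char)) :
    (xs.flatMap (fun x => [(x, (none : Option String)), (sep, label)])).dropLast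
      = inter sep label xs := by
  induction xs with
  | nil => simp [inter]
  | cons x xs ih =>
    cases xs with
    | nil => simp [inter]
    | cons y t =>
      have hne : (y :: t).flatMap (fun x => [(x, (none : Option String)), (sep, label)]) ≠ [] := by
        simp [List.flatMap_cons]
      rw [List.flatMap_cons]
      simp only [List.cons_append, List.nil_append]
      rw [List.dropLast_cons_of_ne_nil (by simp [List.flatMap_cons]),
        List.dropLast_cons_of_ne_nil hne, ih]
      rfl

theorem split_surround_eq (s sep : List Char) (label : Option String) (hsep : sep ≠ []) :
    split_surround s sep label = inter sep label (mySplit sep s) := by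
  unfold split_surround
  simp only [PySem.List.foldl_append_eq_flatMap, PySem.List.slice_to_neg_one,
    splitOn_eq s sep hsep, List.nil_append]
  exact dropLast_flatMap_pair sep label (mySplit sep s)

-- A's per-chunk behaviour
def remE (c : List Char) : List Char := (mySplit mlEnd c).flatten
def postE (c : List Char) : List Char := ((mySplit mlEnd c).tail).flatten

theorem stepA_none_false (r x : List Char) :
    stepA (r, false) (x, none) = (r ++ x, false) := by
  simp [stepA]

theorem stepA_none_true (r x : List Char) :
    stepA (r, true) (x, none) = (r, true) := by
  simp [stepA]

theorem stepA_start (st : List Char × Bool) (x : List Char) :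
    stepA st (x, some "comment-start") = (st.1, true) := by
  simp [stepA]

theorem stepA_end (st : List Char × Bool) (x : List Char) :
    stepA st (x, some "comment-end") = (st.1, false) := by
  simp [stepA]

theorem foldE (ys : List (List Char)) (ret : List Char) (b : Bool) :
    List.foldl stepA (ret, b) (inter mlEnd (some "comment-end") ys)
      = (ret ++ (if b then ys.tail else ys).flatten, b && ys.tail.isEmpty) := by
  induction ys generalizing ret b with
  | nil => simp [inter]
  | cons y ys ih =>
    cases ys with
    | nil =>
      cases b <;> simp [inter, stepA_none_false, stepA_none_true]
    | cons y' t =>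
      show List.foldl stepA (ret, b) ((y, none) :: (mlEnd, some "comment-end") :: _) = _
      cases b with
      | false =>
        rw [List.foldl_cons, stepA_none_false, List.foldl_cons, stepA_end, ih]
        simp [List.append_assoc]
      | true =>
        rw [List.foldl_cons, stepA_none_true, List.foldl_cons, stepA_end, ih]
        simp

def gA0 (p : List Char × Option String) : List (List Char × Option String) :=
  match p.2 with
  | some lbl => [(p.1, some lbl)]
  | none => split_surround p.1 mlEnd (some "comment-end")

theorem foldStart (cs : List (List Char)) (h : cs ≠ []) (ret : List Char) (b : Bool) :
    ∃ b', List.foldl stepA (ret, b)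
        ((mlStart, some "comment-start") :: (inter mlStart (some "comment-start") cs).flatMap gA0)
      = (ret ++ cs.flatMap postE, b') := by
  induction cs generalizing ret b with
  | nil => exact absurd rfl h
  | cons c cs' ih =>
    cases cs' with
    | nil =>
      have h1 : inter mlStart (some "comment-start") [c] = [(c, (none : Option String))] := rfl
      have h2 : gA0 (c, (none : Option String)) = split_surround c mlEnd (some "comment-end") := rfl
      refine ⟨true && ((mySplit mlEnd c).tail).isEmpty, ?_⟩
      rw [h1, List.flatMap_cons, List.flatMap_nil, List.append_nil, h2,
        split_surround_eq c mlEnd (some "comment-end") (by decide),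
        List.foldl_cons, stepA_start, foldE]
      simp [postE]
    | cons c' t =>
      have h1 : inter mlStart (some "comment-start") (c :: c' :: t)
          = (c, (none : Option String)) :: (mlStart, some "comment-start")
            :: inter mlStart (some "comment-start") (c' :: t) := rfl
      have h2 : gA0 (c, (none : Option String)) = split_surround c mlEnd (some "comment-end") := rfl
      have h3 : gA0 (mlStart, some "comment-start") = [(mlStart, some "comment-start")] := rfl
      obtain ⟨b', hb'⟩ := ih (by simp) (ret ++ postE c) (true && ((mySplit mlEnd c).tail).isEmpty)
      refine ⟨b', ?_⟩
      rw [h1, List.flatMap_cons, List.flatMap_cons, h2, h3,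
        split_surround_eq c mlEnd (some "comment-end") (by decide),
        List.foldl_cons, stepA_start, List.foldl_append, foldE]
      simp only [if_pos trivial, List.cons_append, List.nil_append]
      rw [show ((mySplit mlEnd c).tail).flatten = postE c from rfl, hb']
      simp [List.append_assoc]

-- A's closed form
theorem A_closed (source : String) :
    screw_comments source
      = String.ofList (remE ((mySplit mlStart source.toList).head!)
          ++ ((mySplit mlStart source.toList).tail).flatMap postE) := by
  obtain ⟨c0, cs, hsp⟩ : ∃ c0 cs, mySplit mlStart source.toList = c0 :: cs := by
    rcases hh : mySplit mlStart source.toList with _ | ⟨c0, cs⟩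
    · exact absurd hh (mySplit_ne_nil _ _)
    · exact ⟨c0, cs, rfl⟩
  have hfold : (fun (ns : List (List Char × Option String)) (p : List Char × Option String) =>
      match p.2 with
      | some lbl => ns ++ [(p.1, some lbl)]
      | none => ns ++ split_surround p.1 mlEnd (some "comment-end"))
      = fun ns p => ns ++ gA0 p := by
    funext ns p
    rcases p with ⟨x, _ | lbl⟩ <;> rfl
  unfold screw_comments
  simp only [split_surround_eq _ mlStart (some "comment-start") (by decide), hsp, hfold,
    PySem.List.foldl_append_eq_flatMap, List.nil_append, List.head!_cons, List.tail_cons]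
  cases cs with
  | nil =>
    have h1 : inter mlStart (some "comment-start") [c0] = [(c0, (none : Option String))] := rfl
    have h2 : gA0 (c0, (none : Option String)) = split_surround c0 mlEnd (some "comment-end") := rfl
    rw [h1, List.flatMap_cons, List.flatMap_nil, List.append_nil, h2,
      split_surround_eq c0 mlEnd (some "comment-end") (by decide), foldE]
    simp [remE]
  | cons c1 t =>
    have h1 : inter mlStart (some "comment-start") (c0 :: c1 :: t)
        = (c0, (none : Option String)) :: (mlStart, some "comment-start")
          :: inter mlStart (some "comment-start") (c1 :: t) := rfl
    have h2 : gA0 (c0, (none : Option String)) = split_surround c0 mlEnd (some "comment-end") := rfl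
    have h3 : gA0 (mlStart, some "comment-start") = [(mlStart, some "comment-start")] := rfl
    rw [h1, List.flatMap_cons, List.flatMap_cons, h2, h3,
      split_surround_eq c0 mlEnd (some "comment-end") (by decide),
      List.foldl_append, foldE]
    simp only [Bool.false_and, if_neg (by simp : ¬ (false = true)), List.nil_append,
      List.cons_append]
    obtain ⟨b', hb'⟩ := foldStart (c1 :: t) (by simp) ((mySplit mlEnd c0).flatten) false
    rw [hb']
    rfl

-- helpers for the scanner's closed form
theorem consHead_flatten (c : Char) (X : List (List Char)) :
    (consHead c X).flatten = c :: X.flatten := by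
  cases X <;> simp [consHead]

theorem consHead_tail (c : Char) (X : List (List Char)) :
    (consHead c X).tail = X.tail := by
  cases X <;> simp [consHead]

theorem consHead_headPre (c : Char) (pre : List Char) (X : List (List Char)) :
    consHead c (headPre pre X) = headPre (c :: pre) X := by
  cases X <;> simp [consHead, headPre]

theorem mySplit_pos' (sep l : List Char) (h : sep.isPrefixOf l = true) (hs : sep ≠ [])
    (hl : l ≠ []) : mySplit sep l = [] :: mySplit sep (l.drop sep.length) := by
  cases l with
  | nil => exact absurd rfl hl
  | cons c r => exact mySplit_pos sep c r h hs

theorem mySplit_head_prefix (sep : List Char) :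
    ∀ (n : Nat) (l : List Char), l.length ≤ n → (mySplit sep l).head! <+: l := by
  intro n
  induction n with
  | zero =>
    intro l hl
    have hnil : l = [] := List.length_eq_zero_iff.mp (Nat.le_zero.mp hl)
    subst hnil
    rw [mySplit_nil]
    simp
  | succ n ih =>
    intro l hl
    cases l with
    | nil => rw [mySplit_nil]; simp
    | cons c r =>
      by_cases hp : sep.isPrefixOf (c :: r) = true ∧ sep ≠ []
      · rw [mySplit_pos sep c r hp.1 hp.2]
        simp
      · rw [mySplit, dif_neg hp]
        rcases hX : mySplit sep r with _ | ⟨x, xs⟩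
        · exact absurd hX (mySplit_ne_nil sep r)
        · have hx : x <+: r := by
            have hr := ih r (by simp at hl; omega)
            rwa [hX] at hr
          simp only [consHead, List.head!_cons]
          exact List.cons_prefix_cons.mpr ⟨rfl, hx⟩

theorem scanGo_nil (b : Bool) : scanGo [] b = [] := by
  rw [scanGo, dif_neg (by decide), dif_neg (by decide)]

theorem scanGo_start (cs : List Char) (b : Bool) (h : mlStart.isPrefixOf cs = true) :
    scanGo cs b = scanGo (cs.drop mlStart.length) true := by
  rw [scanGo, dif_pos h]

theorem scanGo_end (cs : List Char) (b : Bool) (h1 : ¬ mlStart.isPrefixOf cs = true)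
    (h2 : mlEnd.isPrefixOf cs = true) :
    scanGo cs b = scanGo (cs.drop mlEnd.length) false := by
  rw [scanGo, dif_neg h1, dif_pos h2]

theorem scanGo_cons (c : Char) (r : List Char) (b : Bool)
    (h1 : ¬ mlStart.isPrefixOf (c :: r) = true) (h2 : ¬ mlEnd.isPrefixOf (c :: r) = true) :
    scanGo (c :: r) b = if b then scanGo r b else c :: scanGo r b := by
  rw [scanGo, dif_neg h1, dif_neg h2]

theorem noBad_drop (l : List Char) (k : Nat) (h : ¬ badL <:+: l) : ¬ badL <:+: l.drop k :=
  fun hc => h (hc.trans (List.drop_suffix k l).isInfix)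

theorem noS_within (l : List Char) (hnb : ¬ badL <:+: l) (hE : mlEnd <+: l)
    (hS0 : ¬ mlStart <+: l) : ∀ i, i < mlEnd.length → ¬ mlStart <+: l.drop i := by
  intro i hi hS
  obtain ⟨u, rfl⟩ := hE
  have hi' : i < 15 := by simpa [mlEnd] using hi
  have hhead : ((mlEnd ++ u).drop i).head? = some '#' := by
    obtain ⟨t, ht⟩ := hS
    rw [← ht]; rfl
  have hget : (mlEnd ++ u)[i]? = some '#' := by rw [← List.head?_drop]; exact hhead
  rw [List.getElem?_append_left (by simpa [mlEnd] using hi')] at hget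
  have hcases : i = 0 ∨ i = 14 := by
    interval_cases i <;> revert hget <;> decide
  rcases hcases with rfl | rfl
  · exact hS0 (by simpa using hS)
  · obtain ⟨t, ht⟩ := hS
    have hd : (mlEnd ++ u).drop 14 = '#' :: u := rfl
    rw [hd] at ht
    have hu : u = List.tail mlStart ++ t := by
      have := congrArg List.tail ht
      simpa [mlStart] using this.symm
    apply hnb
    refine ⟨[], t, ?_⟩
    rw [hu]
    have hb : badL = mlEnd ++ List.tail mlStart := by decide
    simp [hb]

theorem mySplit_prepend (sep : List Char) :
    ∀ (pre r : List Char), (∀ i, i < pre.length → ¬ sep <+: (pre ++ r).drop i) →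
      mySplit sep (pre ++ r) = headPre pre (mySplit sep r) := by
  intro pre
  induction pre with
  | nil =>
    intro r _
    simp only [List.nil_append]
    exact (headPre_nil_of_ne_nil _ (mySplit_ne_nil sep r)).symm
  | cons c pre ih =>
    intro r h
    have h0 : ¬ sep.isPrefixOf (c :: (pre ++ r)) = true := by
      intro hc
      exact h 0 (by simp) (by simp; exact List.isPrefixOf_iff_prefix.mp hc)
    rw [List.cons_append, mySplit_neg sep _ _ h0,
      ih r (fun i hi => by simpa using h (i + 1) (by simp; omega)),
      consHead_headPre]

-- the scanner's closed form, on sources avoiding the overlapping-marker substring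
theorem scan_closed : ∀ (n : Nat) (l : List Char) (b : Bool), l.length ≤ n → ¬ (badL <:+: l) →
    scanGo l b
      = (if b then postE ((mySplit mlStart l).head!) else remE ((mySplit mlStart l).head!))
        ++ ((mySplit mlStart l).tail).flatMap postE := by
  intro n
  induction n with
  | zero =>
    intro l b hl _
    have hnil : l = [] := List.length_eq_zero_iff.mp (Nat.le_zero.mp hl)
    subst hnil
    rw [scanGo_nil, mySplit_nil]
    cases b <;> simp [remE, postE, mySplit_nil]
  | succ n ih =>
    intro l b hl hnb
    by_cases hp1 : mlStart.isPrefixOf l = true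
    · cases l with
      | nil => exact absurd hp1 (by decide)
      | cons c r =>
        rw [scanGo_start _ b hp1, mySplit_pos mlStart c r hp1 (by decide)]
        have hlen : ((c :: r).drop mlStart.length).length ≤ n := by
          have h17 : mlStart.length = 17 := by decide
          simp only [List.length_drop, List.length_cons, h17] at *
          omega
        rw [ih _ true hlen (noBad_drop _ _ hnb)]
        rcases hX : mySplit mlStart ((c :: r).drop mlStart.length) with _ | ⟨x, xs⟩
        · exact absurd hX (mySplit_ne_nil _ _)
        · cases b <;> simp [remE, postE, mySplit_nil]
    · by_cases hp2 : mlEnd.isPrefixOf l = true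
      · obtain ⟨u, rfl⟩ := List.isPrefixOf_iff_prefix.mp hp2
        have hS0 : ¬ mlStart <+: mlEnd ++ u := fun hc => hp1 (List.isPrefixOf_iff_prefix.mpr hc)
        have hnoS := noS_within (mlEnd ++ u) hnb ⟨u, rfl⟩ hS0
        rw [scanGo_end _ b hp1 hp2, List.drop_left,
          mySplit_prepend mlStart mlEnd u hnoS]
        rcases hX : mySplit mlStart u with _ | ⟨h0, t0⟩
        · exact absurd hX (mySplit_ne_nil _ _)
        · have hlen : u.length ≤ n := by
            have h15 : mlEnd.length = 15 := by decide
            simp only [List.length_append, h15] at hl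
            omega
          have hnbu : ¬ badL <:+: u := by
            have hh := noBad_drop (mlEnd ++ u) mlEnd.length hnb
            rwa [List.drop_left] at hh
          rw [ih u false hlen hnbu, hX]
          simp only [headPre, List.head!_cons, List.tail_cons]
          have hEpre : mlEnd.isPrefixOf (mlEnd ++ h0) = true :=
            List.isPrefixOf_iff_prefix.mpr ⟨h0, rfl⟩
          have hsplit : mySplit mlEnd (mlEnd ++ h0) = [] :: mySplit mlEnd h0 := by
            rw [mySplit_pos' mlEnd _ hEpre (by decide) (by simp [mlEnd]), List.drop_left]
          have hrem : remE (mlEnd ++ h0) = remE h0 := by simp [remE, hsplit]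
          have hpost : postE (mlEnd ++ h0) = remE h0 := by simp [postE, remE, hsplit]
          cases b <;> simp [hrem, hpost]
      · cases l with
        | nil =>
          rw [scanGo_nil, mySplit_nil]
          cases b <;> simp [remE, postE, mySplit_nil]
        | cons c r =>
          rw [scanGo_cons c r b hp1 hp2, mySplit_neg mlStart c r hp1]
          rcases hX : mySplit mlStart r with _ | ⟨x, xs⟩
          · exact absurd hX (mySplit_ne_nil _ _)
          · have hx : x <+: r := by
              have hr := mySplit_head_prefix mlStart r.length r (le_refl _)
              rwa [hX, List.head!_cons] at hr
            have hEc : ¬ mlEnd.isPrefixOf (c :: x) = true := by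
              intro hc
              exact hp2 (List.isPrefixOf_iff_prefix.mpr
                ((List.isPrefixOf_iff_prefix.mp hc).trans (List.cons_prefix_cons.mpr ⟨rfl, hx⟩)))
            have hrem : remE (c :: x) = c :: remE x := by
              simp [remE, mySplit_neg mlEnd c x hEc, consHead_flatten]
            have hpost : postE (c :: x) = postE x := by
              simp [postE, mySplit_neg mlEnd c x hEc, consHead_tail]
            have hlen : r.length ≤ n := by simp at hl; omega
            have hnbr : ¬ badL <:+: r := by
              have hh := noBad_drop (c :: r) 1 hnb
              simpa using hh
            rw [ih r b hlen hnbr, hX]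
            simp only [consHead, List.head!_cons, List.tail_cons]
            cases b <;> simp [hrem, hpost]

-- ===== VERDICT (by name: the statement is the Claim_ definition above) =====
theorem screw_comments_spec : Claim_equal_screw_comments := by
  intro source _dom hpre
  unfold Spec_screw_comments screw_comments_alt
  rw [A_closed source,
    scan_closed source.toList.length source.toList false (le_refl _) hpre]
  simp
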